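-- pv_equiv track=rewrite | github.com/ow-mi/planner | sample_data/migrate_data.py | detect_branches
-- ===== SOURCE A (Python) =====
-- def detect_branches(legs):
--     """
--     Detect which legs have branches based on duplicate leg_numbers.
--
--     Returns dict: leg_number -> list of (project_leg_id, branch_letter)
--     """
--     from collections import defaultdict
--
--     # Group legs by leg_number
--     legs_by_number = defaultdict(list)
--     for leg in legs:
--         legs_by_number[leg["leg_number"]].append(leg)
--
--     # Identify legs with multiple entries (branches)
--     branches = {}
--     branch_counter = {}
--
--     for leg_number, leg_list in legs_by_number.items():
--         if len(leg_list) > 1: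
--             # Multiple legs with same number = branches
--             branches[leg_number] = {}
--             for i, leg in enumerate(
--                 sorted(leg_list, key=lambda x: x["project_leg_id"])
--             ):
--                 branch_letter = chr(ord("a") + i)  # 'a', 'b', 'c', etc.
--                 branches[leg_number][leg["project_leg_id"]] = branch_letter
--
--     return branches
-- ===== SOURCE B (Python) =====
-- def detect_branches(legs):
--     """
--     Detect which legs have branches based on duplicate leg_numbers.
--
--     Partition peeling instead of hash grouping: repeatedly split the
--     remaining legs on the first leg's number, emit that group if it has
--     duplicates, and continue on the rest.  No grouping dict at all.
--     """
--     branches = {}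
--     remaining = legs
--     while remaining:
--         n = remaining[0]["leg_number"]
--         same = [leg for leg in remaining if leg["leg_number"] == n]
--         remaining = [leg for leg in remaining if leg["leg_number"] != n]
--         if len(same) > 1:
--             branches[n] = {
--                 p: chr(ord("a") + i)
--                 for i, p in enumerate(sorted(leg["project_leg_id"] for leg in same))
--             }
--     return branches
-- ===== Notes on version B (the rewrite author's own statement) =====
-- stated objective: alternative
-- what changed: B replaces A's hash-grouping (defaultdict bucketing all legs, then a loop over buckets) by iterative partition peeling: a while loop repeatedly splits the remaining list on the first leg's number, emits that group if it has duplicates, and continues on the rest, using no grouping dict at all.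
import Mathlib
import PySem

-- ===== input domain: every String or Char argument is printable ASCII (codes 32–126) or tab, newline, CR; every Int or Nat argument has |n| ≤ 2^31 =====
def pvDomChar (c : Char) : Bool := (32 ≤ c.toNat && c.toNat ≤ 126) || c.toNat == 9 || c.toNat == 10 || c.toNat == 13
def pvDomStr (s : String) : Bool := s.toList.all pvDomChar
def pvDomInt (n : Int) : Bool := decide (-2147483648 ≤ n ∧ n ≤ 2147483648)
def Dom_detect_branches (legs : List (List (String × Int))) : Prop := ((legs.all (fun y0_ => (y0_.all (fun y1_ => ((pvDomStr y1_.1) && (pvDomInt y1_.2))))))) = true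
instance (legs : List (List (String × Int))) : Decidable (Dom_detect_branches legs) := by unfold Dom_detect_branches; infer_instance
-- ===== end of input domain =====

-- B replaces A's defaultdict bucketing + per-bucket loop by iterative partition peeling:
-- a while loop repeatedly splits the remaining list on the first leg's number (no grouping dict).

-- ===== PORT A =====
-- chr(ord('a') + i): exact for the indices reached here (0 ≤ i, i a list position)
def pvChr (i : Int) : String := String.ofList [Char.ofNat (97 + i.toNat)]
-- leg["leg_number"] / leg["project_leg_id"]; a missing key raises KeyError in Python — excluded by Pre_
def pvLegNum (leg : List (String × Int)) : Int := (PySem.Dict.mk leg).getD "leg_number" 0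
def pvLegPid (leg : List (String × Int)) : Int := (PySem.Dict.mk leg).getD "project_leg_id" 0

def detect_branches (legs : List (List (String × Int))) : List (Int × List (Int × String)) :=
  -- legs_by_number = defaultdict(list); for leg in legs: legs_by_number[leg["leg_number"]].append(leg)
  let legs_by_number : PySem.Dict Int (List (List (String × Int))) :=
    legs.foldl (fun d leg => d.modify (pvLegNum leg) [] (· ++ [leg])) PySem.Dict.empty
  -- for leg_number, leg_list in legs_by_number.items(): if len(leg_list) > 1: …
  let branches : List (Int × List (Int × String)) :=
    legs_by_number.items.foldl (fun acc p =>
      if 1 < p.2.length then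
        -- for i, leg in enumerate(sorted(leg_list, key=lambda x: x["project_leg_id"])): branches[n][pid] = chr(ord('a')+i)
        let inner : PySem.Dict Int String :=
          ((PySem.List.sorted p.2 pvLegPid false).foldl
            (fun (s : PySem.Dict Int String × Int) leg =>
              (s.1.insert (pvLegPid leg) (pvChr s.2), s.2 + 1)) (PySem.Dict.empty, 0)).1
        acc ++ [(p.1, inner.items)]
      else acc) []
  branches

-- ===== PORT B =====
-- {p: chr(ord('a')+i) for i, p in enumerate(sorted(leg["project_leg_id"] for leg in same))}
def pvLetters (pids : List Int) : List (Int × String) :=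
  ((PySem.List.sorted pids (fun x => x) false).foldl
    (fun (s : PySem.Dict Int String × Int) pid =>
      (s.1.insert pid (pvChr s.2), s.2 + 1)) (PySem.Dict.empty, 0)).1.items

-- the while loop: peel off the group of the first remaining leg, then continue on the rest.
-- branches[n] = … is an append: n is the number of a leg still in `remaining`, so it cannot
-- already be a key of `branches` (every earlier iteration removed all legs with its number).
def dbLoop (remaining : List (List (String × Int))) (branches : List (Int × List (Int × String))) :
    List (Int × List (Int × String)) :=
  match remaining with
  | [] => branches
  | leg0 :: rest0 =>
      let n := pvLegNum leg0
      let same := (leg0 :: rest0).filter (fun l => pvLegNum l == n)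
      let remaining' := (leg0 :: rest0).filter (fun l => !(pvLegNum l == n))
      dbLoop remaining'
        (if 1 < same.length then branches ++ [(n, pvLetters (same.map pvLegPid))] else branches)
termination_by remaining.length
decreasing_by
  simp only [List.filter_cons, beq_self_eq_true, Bool.not_true, List.length_cons]
  exact Nat.lt_succ_of_le (List.length_filter_le _ _)

def detect_branches_alt (legs : List (List (String × Int))) : List (Int × List (Int × String)) :=
  dbLoop legs []

-- ===== PRECONDITION & SPEC =====
-- Exactly where Python A returns: every leg has "leg_number", and every leg of a duplicated
-- leg_number also has "project_leg_id" (A raises KeyError otherwise).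
def Pre_detect_branches (legs : List (List (String × Int))) : Prop :=
  (∀ leg ∈ legs, (PySem.Dict.mk leg).contains "leg_number" = true) ∧
  (∀ leg ∈ legs, 1 < (legs.map pvLegNum).count (pvLegNum leg) →
      (PySem.Dict.mk leg).contains "project_leg_id" = true)
instance (legs : List (List (String × Int))) : Decidable (Pre_detect_branches legs) := by
  unfold Pre_detect_branches; infer_instance

def pvWitness_detect_branches : (List (List (String × Int))) :=
  [[("leg_number", 1), ("project_leg_id", 5)], [("leg_number", 1), ("project_leg_id", 3)]]

def Spec_detect_branches (legs : List (List (String × Int))) (out : List (Int × List (Int × String))) : Prop := out = detect_branches_alt legs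
instance (legs : List (List (String × Int))) (out : List (Int × List (Int × String))) : Decidable (Spec_detect_branches legs out) := by unfold Spec_detect_branches; infer_instance

-- ===== CLAIM (what is proved, stated in full; the proofs are below) =====
def Claim_equal_detect_branches : Prop := ∀ (legs : List (List (String × Int))), Dom_detect_branches legs → Pre_detect_branches legs → Spec_detect_branches legs (detect_branches legs)

-- ===== LEMMAS AND PROOFS =====

-- the common characterization both ports are reduced to
def charDB (legs : List (List (String × Int))) : List (Int × List (Int × String)) :=
  ((PySem.Set.ofList (legs.map pvLegNum)).filter
      (fun n => decide (1 < (legs.map pvLegNum).count n))).map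
    (fun n => (n, pvLetters ((legs.filter (fun l => pvLegNum l == n)).map pvLegPid)))

theorem set_ofList_filter (xs : List Int) (q : Int → Bool) :
    PySem.Set.ofList (xs.filter q) = List.filter q (PySem.Set.ofList xs) := by
  induction xs using List.reverseRecOn with
  | nil => simp
  | append_singleton xs x ih =>
    rw [List.filter_append, PySem.Set.ofList_append_singleton, PySem.Set.add_eq_ite]
    by_cases hq : q x = true
    · have h1 : List.filter q [x] = [x] := by simp [hq]
      rw [h1, PySem.Set.ofList_append_singleton, PySem.Set.add_eq_ite, ih]
      by_cases hx : x ∈ PySem.Set.ofList xs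
      · rw [if_pos hx, if_pos (by simp [List.mem_filter, hx, hq])]
      · rw [if_neg hx, if_neg (by simp [List.mem_filter, hx]), List.filter_append, h1]
    · have h1 : List.filter q [x] = [] := by simp [hq]
      rw [h1, List.append_nil, ih]
      by_cases hx : x ∈ PySem.Set.ofList xs
      · rw [if_pos hx]
      · rw [if_neg hx, List.filter_append, h1, List.append_nil]

theorem map_insertBy {α : Type} (key : α → Int) (x : α) (acc : List α) :
    (PySem.List.insertBy (fun a b => decide (key a < key b)) x acc).map key
      = PySem.List.insertBy (fun a b => decide (a < b)) (key x) (acc.map key) := by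
  induction acc with
  | nil => simp [PySem.List.insertBy]
  | cons y ys ih =>
    simp only [PySem.List.insertBy, List.map_cons]
    by_cases h : key x < key y
    · simp [h]
    · simp [h, ih]

theorem map_foldl_insertBy {α : Type} (key : α → Int) (xs : List α) (acc : List α) :
    (xs.foldl (fun acc x => PySem.List.insertBy (fun a b => decide (key a < key b)) x acc) acc).map key
      = (xs.map key).foldl (fun acc y => PySem.List.insertBy (fun a b => decide (a < b)) y acc) (acc.map key) := by
  induction xs generalizing acc with
  | nil => rfl
  | cons z zs ih => simp only [List.foldl_cons, List.map_cons, ih, map_insertBy]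

theorem map_sorted_key {α : Type} (key : α → Int) (xs : List α) :
    (PySem.List.sorted xs key).map key = PySem.List.sorted (xs.map key) (fun x => x) := by
  rw [PySem.List.sorted_eq_foldl_insertBy, PySem.List.sorted_eq_foldl_insertBy,
    map_foldl_insertBy]
  rfl

theorem group_items {β ν : Type} (l : List β) (key : β → Int) (v : β → ν) :
    (l.foldl (fun (d : PySem.Dict Int (List ν)) x => d.modify (key x) [] (· ++ [v x])) PySem.Dict.empty).items
      = (PySem.Set.ofList (l.map key)).map (fun n => (n, ((l.filter (fun x => key x == n)).map v))) := by
  have hkeys : (l.foldl (fun (d : PySem.Dict Int (List ν)) x => d.modify (key x) [] (· ++ [v x])) PySem.Dict.empty).keys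
      = PySem.Set.ofList (l.map key) := by
    rw [PySem.Dict.keys_foldl_modify_key l key [] (fun _ x => (· ++ [v x]))]
    simp [PySem.Set.update_nil_left]
  have hnd : (l.foldl (fun (d : PySem.Dict Int (List ν)) x => d.modify (key x) [] (· ++ [v x])) PySem.Dict.empty).keys.Nodup := by
    apply PySem.Dict.nodup_keys_foldl_modify_key l key [] (fun _ x => (· ++ [v x]))
    simp
  rw [PySem.Dict.items_eq_map_keys _ hnd [], hkeys]
  apply List.map_congr_left
  intro n _
  have hpair : (l.foldl (fun (d : PySem.Dict Int (List ν)) x => d.modify (key x) [] (· ++ [v x])) PySem.Dict.empty)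
      = ((l.map (fun x => (key x, v x))).foldl (fun d p => d.modify p.1 [] (· ++ [p.2])) PySem.Dict.empty) := by
    rw [List.foldl_map]
  rw [hpair, PySem.Dict.getD_foldl_modify_append, List.filter_map, List.map_map]
  simp [Function.comp_def]

theorem inner_eq (h : List (List (String × Int))) :
    (((PySem.List.sorted h pvLegPid false).foldl
        (fun (s : PySem.Dict Int String × Int) leg =>
          (s.1.insert (pvLegPid leg) (pvChr s.2), s.2 + 1)) (PySem.Dict.empty, 0)).1).items
      = pvLetters (h.map pvLegPid) := by
  unfold pvLetters
  rw [← map_sorted_key pvLegPid h, List.foldl_map]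

theorem filter_key_map {β : Type} (l : List β) (key : β → Int) (q : Int → Bool) :
    (l.filter (fun x => q (key x))).map key = (l.map key).filter q := by
  induction l with
  | nil => rfl
  | cons a t ih => by_cases h : q (key a) <;> simp [h, ih]

theorem count_key (legs : List (List (String × Int))) (n : Int) :
    ((legs.map pvLegNum).count n) = (legs.filter (fun l => pvLegNum l == n)).length := by
  rw [List.count_eq_countP, List.countP_eq_length_filter,
    ← filter_key_map legs pvLegNum (fun m => m == n), List.length_map]

-- A reduces to the characterization
theorem a_eq_char (legs : List (List (String × Int))) :
    detect_branches legs = charDB legs := by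
  unfold detect_branches charDB
  simp only []
  rw [group_items legs pvLegNum (fun x => x)]
  rw [PySem.List.foldl_append_ite
    (p := fun p : Int × List (List (String × Int)) => 1 < p.2.length)
    (f := fun p => (p.1,
      ((PySem.List.sorted p.2 pvLegPid false).foldl
        (fun (s : PySem.Dict Int String × Int) leg =>
          (s.1.insert (pvLegPid leg) (pvChr s.2), s.2 + 1)) (PySem.Dict.empty, 0)).1.items))]
  rw [List.filter_map, List.map_map, List.nil_append]
  simp only [Function.comp_def, List.map_id_fun', id]
  have hf : List.filter (fun n => decide (1 < (legs.filter (fun l => pvLegNum l == n)).length))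
        (PySem.Set.ofList (legs.map pvLegNum))
      = List.filter (fun n => decide (1 < (legs.map pvLegNum).count n))
        (PySem.Set.ofList (legs.map pvLegNum)) :=
    List.filter_congr (fun n _ => by rw [count_key])
  rw [hf]
  exact List.map_congr_left (fun n _ => by rw [inner_eq])

theorem set_ofList_cons (n : Int) (xs : List Int) :
    PySem.Set.ofList (n :: xs) = n :: (PySem.Set.ofList xs).filter (fun m => !(m == n)) := by
  induction xs using List.reverseRecOn with
  | nil => simp [PySem.Set.ofList]
  | append_singleton xs x ih =>
    rw [show n :: (xs ++ [x]) = (n :: xs) ++ [x] from rfl,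
      PySem.Set.ofList_append_singleton, PySem.Set.ofList_append_singleton,
      PySem.Set.add_eq_ite, PySem.Set.add_eq_ite, ih]
    by_cases hxn : x = n
    · subst hxn
      rw [if_pos (List.mem_cons_self)]
      by_cases hx : x ∈ PySem.Set.ofList xs
      · rw [if_pos hx]
      · rw [if_neg hx, List.filter_append]
        simp
    · by_cases hx : x ∈ PySem.Set.ofList xs
      · rw [if_pos, if_pos hx]
        simp [List.mem_filter, hx, hxn]
      · rw [if_neg, if_neg hx, List.filter_append]
        · simp [hxn]
        · simp [List.mem_filter, hx, hxn]

theorem count_filter_ne (xs : List Int) (n m : Int) (h : ¬ m = n) :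
    (xs.filter (fun k => !(k == n))).count m = xs.count m :=
  List.count_filter (by simp [h])

theorem filter_ne_filter_eq {β : Type} (l : List β) (key : β → Int) (n m : Int) (h : ¬ m = n) :
    ((l.filter (fun x => !(key x == n))).filter (fun x => key x == m)) = l.filter (fun x => key x == m) := by
  rw [List.filter_filter]
  apply List.filter_congr
  intro x _
  by_cases hk : key x = m
  · simp [hk, h]
  · simp [hk]

-- one peeling step on the characterization
theorem char_cons (leg0 : List (String × Int)) (rest0 : List (List (String × Int))) :
    charDB (leg0 :: rest0)
      = (if 1 < ((leg0 :: rest0).filter (fun l => pvLegNum l == pvLegNum leg0)).length then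
          [(pvLegNum leg0, pvLetters (((leg0 :: rest0).filter (fun l => pvLegNum l == pvLegNum leg0)).map pvLegPid))]
        else [])
        ++ charDB ((leg0 :: rest0).filter (fun l => !(pvLegNum l == pvLegNum leg0))) := by
  set n := pvLegNum leg0 with hn
  have hmapcons : (leg0 :: rest0).map pvLegNum = n :: rest0.map pvLegNum := rfl
  have hremmap : (((leg0 :: rest0).filter (fun l => !(pvLegNum l == n))).map pvLegNum)
      = (rest0.map pvLegNum).filter (fun m => !(m == n)) := by
    rw [filter_key_map _ pvLegNum (fun m => !(m == n)), hmapcons, List.filter_cons]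
    simp
  unfold charDB
  rw [hmapcons, set_ofList_cons, hremmap, set_ofList_filter, List.filter_cons]
  set T := List.filter (fun m => !(m == n)) (PySem.Set.ofList (rest0.map pvLegNum)) with hT
  have hmemT : ∀ m ∈ T, ¬ m = n := by
    intro m hm
    have := List.of_mem_filter hm
    simpa using this
  have hqcong : List.filter (fun m => decide (1 < (n :: rest0.map pvLegNum).count m)) T
      = List.filter (fun m => decide (1 < ((rest0.map pvLegNum).filter (fun k => !(k == n))).count m)) T := by
    apply List.filter_congr
    intro m hm
    rw [count_filter_ne _ _ _ (hmemT m hm), List.count_cons,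
      if_neg (fun h => hmemT m hm ((by simpa using h : n = m).symm))]
    simp
  have hcnt : (n :: rest0.map pvLegNum).count n
      = ((leg0 :: rest0).filter (fun l => pvLegNum l == n)).length := by
    rw [← hmapcons, count_key]
  have htail : List.map (fun m => (m, pvLetters (((leg0 :: rest0).filter (fun l => pvLegNum l == m)).map pvLegPid)))
        (List.filter (fun m => decide (1 < ((rest0.map pvLegNum).filter (fun k => !(k == n))).count m)) T)
      = List.map (fun m => (m, pvLetters (((((leg0 :: rest0).filter (fun l => !(pvLegNum l == n))).filter (fun l => pvLegNum l == m))).map pvLegPid)))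
        (List.filter (fun m => decide (1 < ((rest0.map pvLegNum).filter (fun k => !(k == n))).count m)) T) := by
    apply List.map_congr_left
    intro m hm
    rw [filter_ne_filter_eq _ pvLegNum n m (hmemT m (List.mem_of_mem_filter hm))]
  by_cases hc : 1 < ((leg0 :: rest0).filter (fun l => pvLegNum l == n)).length
  · rw [if_pos (by rw [hcnt]; exact decide_eq_true hc), if_pos hc, List.map_cons, hqcong,
      ← List.singleton_append]
    exact congrArg₂ (· ++ ·) rfl htail
  · rw [if_neg (by rw [hcnt]; simpa using hc), if_neg hc, hqcong, List.nil_append]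
    exact htail

-- B reduces to the characterization
theorem loop_eq_char : ∀ (k : Nat) (remaining : List (List (String × Int))),
    remaining.length ≤ k → ∀ (acc : List (Int × List (Int × String))),
    dbLoop remaining acc = acc ++ charDB remaining := by
  intro k
  induction k with
  | zero =>
    intro remaining hlen acc
    have : remaining = [] := List.eq_nil_of_length_eq_zero (Nat.le_zero.1 hlen)
    subst this
    simp [dbLoop, charDB, PySem.Set.ofList]
  | succ k ih =>
    intro remaining hlen acc
    match remaining with
    | [] => simp [dbLoop, charDB, PySem.Set.ofList]
    | leg0 :: rest0 =>
      rw [dbLoop]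
      have hlen' : ((leg0 :: rest0).filter (fun l => !(pvLegNum l == pvLegNum leg0))).length ≤ k := by
        simp only [List.filter_cons, beq_self_eq_true, Bool.not_true]
        calc (rest0.filter _).length ≤ rest0.length := List.length_filter_le _ _
          _ ≤ k := Nat.le_of_succ_le_succ hlen
      rw [ih _ hlen', char_cons]
      by_cases hc : 1 < ((leg0 :: rest0).filter (fun l => pvLegNum l == pvLegNum leg0)).length
      · rw [if_pos hc, if_pos hc, List.append_assoc]
      · rw [if_neg hc, if_neg hc, List.nil_append]

-- ===== VERDICT (by name: the statement is the Claim_ definition above) =====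
theorem detect_branches_spec : Claim_equal_detect_branches := by
  intro legs _ _
  unfold Spec_detect_branches detect_branches_alt
  rw [loop_eq_char legs.length legs (Nat.le_refl _), List.nil_append, a_eq_char]
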